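-- pv_equiv track=rewrite | github.com/EdwardAstill/mdtyp | mdtyp/latex2typst.py | _quote_multichar_identifiers
-- ===== SOURCE A (Python) =====
-- _TYPST_MATH_IDENTS: frozenset[str] = frozenset({
--     # Typst math functions
--     "frac", "sqrt", "root", "binom", "boxed",
--     "hat", "macron", "arrow", "diaer", "tilde",
--     "overline", "underline", "overbrace", "underbrace",
--     "upright", "bold", "italic", "cal", "op", "bb",
--     "mat", "cases", "delim",
--     # Math operator functions
--     "lim", "sup", "inf", "min", "max",
--     "log", "ln", "exp",
--     "sin", "cos", "tan", "sec", "csc", "cot",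
--     "arcsin", "arccos", "arctan",
--     "sinh", "cosh", "tanh",
--     "det", "dim", "ker", "deg", "arg", "gcd", "mod",
--     # Symbols
--     "dot", "times", "div", "compose", "ast", "star",
--     "approx", "equiv", "prop",
--     "subset", "supset",
--     "forall", "exists",
--     "sum", "product", "integral",
--     "union", "sect",
--     "nabla", "infinity", "diff", "ell", "aleph", "nothing",
--     "dots", "quad", "wide", "thin", "med",
--     "Re", "Im",
--     "and", "or", "not", "in",
--     "plus", "minus",
--     # Greek lowercase
--     "alpha", "beta", "gamma", "delta", "epsilon", "zeta", "eta", "theta",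
--     "iota", "kappa", "lambda", "mu", "nu", "xi", "pi", "rho", "sigma",
--     "tau", "upsilon", "phi", "chi", "psi", "omega",
--     # Greek uppercase
--     "Gamma", "Delta", "Theta", "Lambda", "Xi", "Pi", "Sigma", "Upsilon",
--     "Phi", "Psi", "Omega",
--     # Blackboard bold
--     "RR", "NN", "ZZ", "QQ", "CC", "FF", "PP", "EE",
-- })
--
-- def _quote_multichar_identifiers(s: str) -> str:
--     """Wrap multi-letter identifiers not known to Typst math in double quotes.
--
--     In Typst math mode consecutive letters like ``EX`` are parsed as separate
--     multiplied variables.  Unknown multi-letter names must be quoted so they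
--     render as a single identifier.
--     """
--     result: list[str] = []
--     i = 0
--     while i < len(s):
--         # Pass already-quoted strings through unchanged.
--         if s[i] == '"':
--             j = i + 1
--             while j < len(s) and s[j] != '"':
--                 j += 1
--             result.append(s[i : j + 1])
--             i = j + 1
--             continue
--         # Collect a run of letters.
--         if s[i].isalpha():
--             j = i
--             while j < len(s) and s[j].isalpha():
--                 j += 1
--             word = s[i:j]
--             # Skip whitespace, then check whether a '(' follows (function call).
--             k = j
--             while k < len(s) and s[k] == " ":
--                 k += 1
--             is_func_call = k < len(s) and s[k] == "("
--             # Don't quote modifiers after a dot (e.g. subset.eq, in.not)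
--             is_dot_modifier = i > 0 and s[i - 1] == "."
--             if (
--                 len(word) >= 2
--                 and word not in _TYPST_MATH_IDENTS
--                 and not is_func_call
--                 and not is_dot_modifier
--             ):
--                 result.append(f'"{word}"')
--             else:
--                 result.append(word)
--             i = j
--             continue
--         result.append(s[i])
--         i += 1
--     return "".join(result)
-- ===== SOURCE B (Python) =====
-- _TYPST_MATH_IDENTS: frozenset[str] = frozenset({
--     "frac", "sqrt", "root", "binom", "boxed",
--     "hat", "macron", "arrow", "diaer", "tilde",
--     "overline", "underline", "overbrace", "underbrace",
--     "upright", "bold", "italic", "cal", "op", "bb",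
--     "mat", "cases", "delim",
--     "lim", "sup", "inf", "min", "max",
--     "log", "ln", "exp",
--     "sin", "cos", "tan", "sec", "csc", "cot",
--     "arcsin", "arccos", "arctan",
--     "sinh", "cosh", "tanh",
--     "det", "dim", "ker", "deg", "arg", "gcd", "mod",
--     "dot", "times", "div", "compose", "ast", "star",
--     "approx", "equiv", "prop",
--     "subset", "supset",
--     "forall", "exists",
--     "sum", "product", "integral",
--     "union", "sect",
--     "nabla", "infinity", "diff", "ell", "aleph", "nothing",
--     "dots", "quad", "wide", "thin", "med",
--     "Re", "Im",
--     "and", "or", "not", "in",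
--     "plus", "minus",
--     "alpha", "beta", "gamma", "delta", "epsilon", "zeta", "eta", "theta",
--     "iota", "kappa", "lambda", "mu", "nu", "xi", "pi", "rho", "sigma",
--     "tau", "upsilon", "phi", "chi", "psi", "omega",
--     "Gamma", "Delta", "Theta", "Lambda", "Xi", "Pi", "Sigma", "Upsilon",
--     "Phi", "Psi", "Omega",
--     "RR", "NN", "ZZ", "QQ", "CC", "FF", "PP", "EE",
-- })
--
--
-- def _tokenize(s: str) -> list[str]:
--     """Split s into quoted strings, maximal letter runs, and single characters."""
--     tokens: list[str] = []
--     i, n = 0, len(s)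
--     while i < n:
--         if s[i] == '"':
--             j = s.find('"', i + 1)
--             j = n - 1 if j == -1 else j
--             tokens.append(s[i:j + 1])
--             i = j + 1
--         elif s[i].isalpha():
--             j = i + 1
--             while j < n and s[j].isalpha():
--                 j += 1
--             tokens.append(s[i:j])
--             i = j
--         else:
--             tokens.append(s[i])
--             i += 1
--     return tokens
--
--
-- def _quote_multichar_identifiers(s: str) -> str:
--     """Wrap multi-letter identifiers not known to Typst math in double quotes.
--
--     Two phases: tokenize, then classify each token from its neighbours in
--     the token stream (previous token for dot-modifiers, next non-space
--     token for function calls).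
--     """
--     tokens = _tokenize(s)
--     out: list[str] = []
--     for idx, tok in enumerate(tokens):
--         if tok[0].isalpha() and len(tok) >= 2 and tok not in _TYPST_MATH_IDENTS:
--             is_dot_modifier = idx > 0 and tokens[idx - 1].endswith(".")
--             k = idx + 1
--             while k < len(tokens) and tokens[k] == " ":
--                 k += 1
--             is_func_call = k < len(tokens) and tokens[k].startswith("(")
--             if not is_func_call and not is_dot_modifier:
--                 out.append('"' + tok + '"')
--                 continue
--         out.append(tok)
--     return "".join(out)
-- ===== Notes on version B (the rewrite author's own statement) =====
-- stated objective: alternative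
-- what changed: A's single interleaved scanner (indices i/j/k over the raw string, quoting decided inline) is replaced by a two-phase pipeline: first tokenize the string into quoted strings, maximal letter runs and single characters, then classify each token purely from its neighbours in the token stream (previous token for dot-modifiers, next non-space token for function calls) and join.
import Mathlib
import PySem

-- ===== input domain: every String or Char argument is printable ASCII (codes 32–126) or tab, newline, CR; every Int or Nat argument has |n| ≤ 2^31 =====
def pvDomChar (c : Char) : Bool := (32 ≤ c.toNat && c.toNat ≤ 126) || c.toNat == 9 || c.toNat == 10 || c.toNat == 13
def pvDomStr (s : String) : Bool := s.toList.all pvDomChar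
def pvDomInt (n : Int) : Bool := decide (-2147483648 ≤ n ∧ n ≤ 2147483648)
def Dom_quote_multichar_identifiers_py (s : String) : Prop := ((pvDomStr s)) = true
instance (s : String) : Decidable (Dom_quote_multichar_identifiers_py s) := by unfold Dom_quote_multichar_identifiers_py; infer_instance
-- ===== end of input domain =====

-- B replaces A's single interleaved index scanner with a tokenize-then-classify
-- pipeline over a token stream (objective: alternative; same asymptotic cost).

-- _TYPST_MATH_IDENTS (shared data table, used by both ports)
def pvIdents : List (List Char) :=
  (["frac", "sqrt", "root", "binom", "boxed",
    "hat", "macron", "arrow", "diaer", "tilde",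
    "overline", "underline", "overbrace", "underbrace",
    "upright", "bold", "italic", "cal", "op", "bb",
    "mat", "cases", "delim",
    "lim", "sup", "inf", "min", "max",
    "log", "ln", "exp",
    "sin", "cos", "tan", "sec", "csc", "cot",
    "arcsin", "arccos", "arctan",
    "sinh", "cosh", "tanh",
    "det", "dim", "ker", "deg", "arg", "gcd", "mod",
    "dot", "times", "div", "compose", "ast", "star",
    "approx", "equiv", "prop",
    "subset", "supset",
    "forall", "exists",
    "sum", "product", "integral",
    "union", "sect",
    "nabla", "infinity", "diff", "ell", "aleph", "nothing",
    "dots", "quad", "wide", "thin", "med",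
    "Re", "Im",
    "and", "or", "not", "in",
    "plus", "minus",
    "alpha", "beta", "gamma", "delta", "epsilon", "zeta", "eta", "theta",
    "iota", "kappa", "lambda", "mu", "nu", "xi", "pi", "rho", "sigma",
    "tau", "upsilon", "phi", "chi", "psi", "omega",
    "Gamma", "Delta", "Theta", "Lambda", "Xi", "Pi", "Sigma", "Upsilon",
    "Phi", "Psi", "Omega",
    "RR", "NN", "ZZ", "QQ", "CC", "FF", "PP", "EE"].map String.toList)

-- ===== PORT A =====
-- A's while loop over index i, ported as recursion over the remaining suffix;
-- prevDot carries "s[i-1] == '.'" (A's is_dot_modifier test of the previous char).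
-- The inner while loops (quote scan, letter run, space skip) are takeWhile/dropWhile
-- over the same characters.
def pvGoA : List Char → Bool → List Char
  | [], _ => []
  | c :: cs, prevDot =>
    if c = '"' then
      -- pass already-quoted strings through unchanged
      match h : cs.dropWhile (fun x => !(x == '"')) with
      | [] => c :: cs.takeWhile (fun x => !(x == '"'))          -- unclosed quote: rest of string
      | q :: r => c :: cs.takeWhile (fun x => !(x == '"')) ++ q :: pvGoA r false
    else if PySem.Chars.isalpha c then
      -- collect a run of letters
      let w := c :: cs.takeWhile PySem.Chars.isalpha
      let rest := cs.dropWhile PySem.Chars.isalpha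
      -- skip spaces, then check whether '(' follows
      let isFunc := (rest.dropWhile (fun x => x == ' ')).head? == some '('
      if 2 ≤ w.length ∧ ¬ pvIdents.contains w = true ∧ ¬ isFunc = true ∧ ¬ prevDot = true then
        '"' :: w ++ '"' :: pvGoA rest false
      else
        w ++ pvGoA rest false
    else c :: pvGoA cs (c == '.')
termination_by cs _ => cs.length
decreasing_by
  all_goals simp only [List.length_cons]
  · have h1 := List.length_dropWhile_le (fun x => !(x == '"')) cs
    rw [h] at h1; simp at h1; omega
  · have h1 := List.length_dropWhile_le PySem.Chars.isalpha cs; omega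
  · have h1 := List.length_dropWhile_le PySem.Chars.isalpha cs; omega
  · omega

def quote_multichar_identifiers_py (s : String) : String :=
  String.ofList (pvGoA s.toList false)

-- ===== PORT B =====
-- B tokenizes the whole string first, then classifies each token from its
-- neighbours in the token stream.

-- s.find('"', i+1) and the slices around it: split at the first '"' (B's find-and-slice).
def pvSplitQuote : List Char → List Char × List Char
  | [] => ([], [])
  | c :: cs =>
    if c = '"' then ([], c :: cs)
    else
      let p := pvSplitQuote cs
      (c :: p.1, p.2)

theorem pvSplitQuote_snd_len_le : ∀ cs : List Char, (pvSplitQuote cs).2.length ≤ cs.length := by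
  intro cs
  induction cs with
  | nil => simp [pvSplitQuote]
  | cons c cs ih =>
      simp only [pvSplitQuote]
      split
      · simp
      · simpa using Nat.le_succ_of_le ih

-- Phase 1: quoted strings, maximal letter runs, single characters.
def pvTokenize : List Char → List (List Char)
  | [] => []
  | c :: cs =>
    if c = '"' then
      match h : pvSplitQuote cs with
      | (ins, []) => [c :: ins]                       -- unclosed: token is the rest of s
      | (ins, q :: r) => (c :: (ins ++ [q])) :: pvTokenize r
    else if PySem.Chars.isalpha c then
      (c :: cs.takeWhile PySem.Chars.isalpha) :: pvTokenize (cs.dropWhile PySem.Chars.isalpha)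
    else [c] :: pvTokenize cs
termination_by cs => cs.length
decreasing_by
  all_goals simp only [List.length_cons]
  · have h1 := pvSplitQuote_snd_len_le cs
    rw [h] at h1; simp at h1; omega
  · have h1 := List.length_dropWhile_le PySem.Chars.isalpha cs; omega
  · omega

-- tokens[idx-1].endswith(".") with no previous token at idx = 0
def pvPrevDot : Option (List Char) → Bool
  | none => false
  | some t => PySem.Chars.endswith t ['.']

-- skip " " tokens, then tokens[k].startswith("(")
def pvNextParen (ts : List (List Char)) : Bool :=
  match ts.dropWhile (fun u => u == [' ']) with
  | [] => false
  | u :: _ => PySem.Chars.startswith u ['(']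

-- tok[0].isalpha()
def pvHeadAlpha (t : List Char) : Bool :=
  match t.head? with
  | some c => PySem.Chars.isalpha c
  | none => false

-- Phase 2: classify each token from its neighbours in the stream.
def pvClassify : Option (List Char) → List (List Char) → List (List Char)
  | _, [] => []
  | prev, t :: ts =>
    let emit :=
      if pvHeadAlpha t = true ∧ 2 ≤ t.length ∧ ¬ pvIdents.contains t = true then
        if ¬ pvNextParen ts = true ∧ ¬ pvPrevDot prev = true then '"' :: (t ++ ['"']) else t
      else t
    emit :: pvClassify (some t) ts

def quote_multichar_identifiers_py_alt (s : String) : String :=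
  String.ofList (pvClassify none (pvTokenize s.toList)).flatten

-- ===== PRECONDITION & SPEC =====
def Spec_quote_multichar_identifiers_py (s : String) (out : String) : Prop := out = quote_multichar_identifiers_py_alt s
instance (s : String) (out : String) : Decidable (Spec_quote_multichar_identifiers_py s out) := by unfold Spec_quote_multichar_identifiers_py; infer_instance

-- ===== CLAIM (what is proved, stated in full; the proofs are below) =====
def Claim_equal_quote_multichar_identifiers_py : Prop := ∀ (s : String), Dom_quote_multichar_identifiers_py s → Spec_quote_multichar_identifiers_py s (quote_multichar_identifiers_py s)

-- ===== LEMMAS AND PROOFS =====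

-- step lemmas for the two recursive scanners (one per branch)
theorem pvGoA_quote_open (cs : List Char) (pd : Bool)
    (h : cs.dropWhile (fun x => !(x == '"')) = []) :
    pvGoA ('"' :: cs) pd = '"' :: cs.takeWhile (fun x => !(x == '"')) := by
  rw [pvGoA]
  rw [if_pos rfl]
  split
  · rfl
  · next q r heq => rw [h] at heq; cases heq

theorem pvGoA_quote_closed (cs : List Char) (pd : Bool) (q : Char) (r : List Char)
    (h : cs.dropWhile (fun x => !(x == '"')) = q :: r) :
    pvGoA ('"' :: cs) pd = '"' :: cs.takeWhile (fun x => !(x == '"')) ++ q :: pvGoA r false := by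
  rw [pvGoA]
  rw [if_pos rfl]
  split
  · next heq => rw [h] at heq; cases heq
  · next q' r' heq => rw [h] at heq; cases heq; rfl

theorem pvGoA_alpha (c : Char) (cs : List Char) (pd : Bool)
    (hq : ¬ c = '"') (ha : PySem.Chars.isalpha c = true) :
    pvGoA (c :: cs) pd =
      (if 2 ≤ (c :: cs.takeWhile PySem.Chars.isalpha).length ∧
          ¬ pvIdents.contains (c :: cs.takeWhile PySem.Chars.isalpha) = true ∧
          ¬ (((cs.dropWhile PySem.Chars.isalpha).dropWhile (fun x => x == ' ')).head? == some '(') = true ∧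
          ¬ pd = true then
        '"' :: (c :: cs.takeWhile PySem.Chars.isalpha) ++ '"' :: pvGoA (cs.dropWhile PySem.Chars.isalpha) false
      else
        (c :: cs.takeWhile PySem.Chars.isalpha) ++ pvGoA (cs.dropWhile PySem.Chars.isalpha) false) := by
  rw [pvGoA]
  rw [if_neg hq, if_pos ha]

theorem pvGoA_other (c : Char) (cs : List Char) (pd : Bool)
    (hq : ¬ c = '"') (ha : ¬ PySem.Chars.isalpha c = true) :
    pvGoA (c :: cs) pd = c :: pvGoA cs (c == '.') := by
  rw [pvGoA]
  rw [if_neg hq, if_neg ha]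

theorem pvTokenize_quote_open (cs ins : List Char) (h : pvSplitQuote cs = (ins, [])) :
    pvTokenize ('"' :: cs) = ['"' :: ins] := by
  rw [pvTokenize]
  rw [if_pos rfl]
  split
  · next ins' heq => rw [h] at heq; cases heq; rfl
  · next ins' q r heq => rw [h] at heq; cases heq

theorem pvTokenize_quote_closed (cs ins : List Char) (q : Char) (r : List Char)
    (h : pvSplitQuote cs = (ins, q :: r)) :
    pvTokenize ('"' :: cs) = ('"' :: (ins ++ [q])) :: pvTokenize r := by
  rw [pvTokenize]
  rw [if_pos rfl]
  split
  · next ins' heq => rw [h] at heq; cases heq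
  · next ins' q' r' heq => rw [h] at heq; cases heq; rfl

theorem pvTokenize_alpha (c : Char) (cs : List Char)
    (hq : ¬ c = '"') (ha : PySem.Chars.isalpha c = true) :
    pvTokenize (c :: cs) =
      (c :: cs.takeWhile PySem.Chars.isalpha) :: pvTokenize (cs.dropWhile PySem.Chars.isalpha) := by
  rw [pvTokenize]
  rw [if_neg hq, if_pos ha]

theorem pvTokenize_other (c : Char) (cs : List Char)
    (hq : ¬ c = '"') (ha : ¬ PySem.Chars.isalpha c = true) :
    pvTokenize (c :: cs) = [c] :: pvTokenize cs := by
  rw [pvTokenize]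
  rw [if_neg hq, if_neg ha]

theorem pvSplitQuote_eq (cs : List Char) :
    pvSplitQuote cs = (cs.takeWhile (fun x => !(x == '"')), cs.dropWhile (fun x => !(x == '"'))) := by
  induction cs with
  | nil => simp [pvSplitQuote]
  | cons c cs ih =>
      by_cases h : c = '"'
      · subst h; simp [pvSplitQuote, List.takeWhile, List.dropWhile]
      · have hb : (!(c == '"')) = true := by simp [h]
        simp only [pvSplitQuote, if_neg h, ih, List.takeWhile, List.dropWhile, hb]

theorem pvStartswith_paren (a : Char) (u : List Char) :
    PySem.Chars.startswith (a :: u) ['('] = (a == '(') := by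
  by_cases h : a = '('
  · subst h
    simpa using (PySem.Chars.startswith_iff ('(' :: u) ['(']).mpr ⟨u, rfl⟩
  · rw [show ((a == '(') : Bool) = false by simpa using h, Bool.eq_false_iff]
    intro hh
    rcases (PySem.Chars.startswith_iff _ _).mp hh with ⟨t, ht⟩
    simp at ht
    exact h ht.1.symm

-- the next-non-space-is-'(' test agrees between the char stream and the token stream
theorem pvNextParen_tokenize (cs : List Char) :
    pvNextParen (pvTokenize cs) = ((cs.dropWhile (fun x => x == ' ')).head? == some '(') := by
  induction hn : cs.length using Nat.strong_induction_on generalizing cs with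
  | _ n ih =>
    match cs with
    | [] => simp [pvTokenize, pvNextParen, List.dropWhile]
    | c :: cs =>
      by_cases hsp : c = ' '
      · subst hsp
        rw [pvTokenize_other _ _ (by decide) (by decide)]
        have := ih cs.length (by subst hn; simp) cs rfl
        simp only [pvNextParen] at this ⊢
        rw [List.dropWhile_cons, List.dropWhile_cons]
        simpa using this
      · -- first token starts with c ≠ ' ', so dropWhile on tokens stops at it
        have hhead : ∃ u ts, pvTokenize (c :: cs) = u :: ts ∧ u.head? = some c ∧ u ≠ [' '] := by
          by_cases hq : c = '"'
          · subst hq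
            rcases h : pvSplitQuote cs with ⟨ins, rest⟩
            match rest, h with
            | [], h =>
              exact ⟨_, _, pvTokenize_quote_open cs ins h, rfl, by intro hc; simp at hc⟩
            | q :: r, h =>
              exact ⟨_, _, pvTokenize_quote_closed cs ins q r h, rfl,
                by intro hc; simp at hc⟩
          · by_cases ha : PySem.Chars.isalpha c
            · refine ⟨_, _, pvTokenize_alpha c cs hq ha, rfl, ?_⟩
              intro hc; simp at hc; exact hsp hc.1
            · refine ⟨_, _, pvTokenize_other c cs hq ha, rfl, ?_⟩
              intro hc; simp at hc; exact hsp hc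
        rcases hhead with ⟨u, ts, hts, hu, hne⟩
        rw [hts]
        have h1 : List.dropWhile (fun u => u == [' ']) (u :: ts) = u :: ts := by
          rw [List.dropWhile_cons]; simp [hne]
        have h2 : List.dropWhile (fun x => x == ' ') (c :: cs) = c :: cs := by
          rw [List.dropWhile_cons]; simp [hsp]
        simp only [pvNextParen, h1, h2, List.head?_cons]
        match u, hu with
        | a :: u', hu =>
          have hac : a = c := by simpa using hu
          rw [pvStartswith_paren, hac]
          rfl

-- a token containing only alphabetic characters never triggers the dot-modifier test
theorem pvPrevDot_word (c : Char) (w : List Char)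
    (hc : PySem.Chars.isalpha c = true) (hw : ∀ x ∈ w, PySem.Chars.isalpha x = true) :
    pvPrevDot (some (c :: w)) = false := by
  simp only [pvPrevDot]
  rw [Bool.eq_false_iff]
  intro hend
  rcases (PySem.Chars.endswith_iff _ _).mp hend with ⟨pre, hpre⟩
  have hmem : '.' ∈ c :: w := by rw [← hpre]; simp
  rcases List.mem_cons.mp hmem with h | h
  · rw [← h] at hc; exact absurd hc (by decide)
  · exact absurd (hw _ h) (by decide)

theorem pvPrevDot_singleton (c : Char) : pvPrevDot (some [c]) = (c == '.') := by
  simp only [pvPrevDot]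
  by_cases h : c = '.'
  · subst h; simp [PySem.Chars.endswith]
  · rw [show ((c == '.') : Bool) = false by simpa using h]
    rw [Bool.eq_false_iff]
    intro hend
    rcases (PySem.Chars.endswith_iff _ _).mp hend with ⟨pre, hpre⟩
    have hpre' : pre = [] := by
      have := congrArg List.length hpre; simpa using this
    subst hpre'; simp at hpre; exact h hpre.symm

-- the main correspondence: A's scanner = flatten (classify (tokenize s))
theorem pvMain : ∀ (n : Nat) (cs : List Char), cs.length ≤ n → ∀ (prev : Option (List Char)),
    pvGoA cs (pvPrevDot prev) = (pvClassify prev (pvTokenize cs)).flatten := by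
  intro n
  induction n with
  | zero =>
      intro cs hcs prev
      match cs with
      | [] => simp [pvGoA, pvTokenize, pvClassify]
  | succ n ih =>
      intro cs hcs prev
      match cs with
      | [] => simp [pvGoA, pvTokenize, pvClassify]
      | c :: cs =>
        by_cases hq : c = '"'
        · subst hq
          rcases hsp : pvSplitQuote cs with ⟨ins, rest⟩
          have hpair := pvSplitQuote_eq cs
          rw [hsp] at hpair
          have hins : ins = cs.takeWhile (fun x => !(x == '"')) :=
            congrArg Prod.fst hpair
          have hrest : rest = cs.dropWhile (fun x => !(x == '"')) :=
            congrArg Prod.snd hpair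
          match rest, hrest with
          | [], hrest =>
            rw [pvGoA_quote_open cs _ hrest.symm, pvTokenize_quote_open cs ins hsp]
            have hf : pvHeadAlpha ('"' :: ins) = false := rfl
            simp only [pvClassify, List.flatten_cons]
            rw [if_neg (fun hh => Bool.false_ne_true (hf ▸ hh.1))]
            simp [hins]
          | q :: r, hrest =>
            have hq' : q = '"' := by
              have h2 := List.head?_dropWhile_not (fun x => !(x == '"')) cs
              rw [← hrest] at h2; simp at h2; simpa using h2
            subst hq'
            rw [pvGoA_quote_closed cs _ '"' r hrest.symm, pvTokenize_quote_closed cs ins '"' r hsp]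
            have hlen : r.length ≤ n := by
              have h3 : ('"' :: r).length ≤ cs.length := hrest ▸ List.length_dropWhile_le _ _
              simp at h3 hcs; omega
            have hpd : pvPrevDot (some ('"' :: (ins ++ ['"']))) = false := by
              simp only [pvPrevDot]
              rw [Bool.eq_false_iff]
              intro hend
              rcases (PySem.Chars.endswith_iff _ _).mp hend with ⟨pre, hpre⟩
              have h5 := congrArg List.getLast? hpre
              rw [← List.cons_append, List.getLast?_concat, List.getLast?_concat] at h5
              simp at h5
            have hrec := ih r hlen (some ('"' :: (ins ++ ['"'])))
            rw [hpd] at hrec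
            have hf : pvHeadAlpha ('"' :: (ins ++ ['"'])) = false := rfl
            simp only [pvClassify, List.flatten_cons]
            rw [if_neg (fun hh => Bool.false_ne_true (hf ▸ hh.1))]
            rw [hrec]
            simp [hins]
        · by_cases ha : PySem.Chars.isalpha c
          · rw [pvGoA_alpha c cs _ hq ha, pvTokenize_alpha c cs hq ha]
            have hlen : (cs.dropWhile PySem.Chars.isalpha).length ≤ n := by
              have := List.length_dropWhile_le PySem.Chars.isalpha cs
              simp at hcs; omega
            have hrec := ih (cs.dropWhile PySem.Chars.isalpha) hlen
              (some (c :: cs.takeWhile PySem.Chars.isalpha))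
            rw [pvPrevDot_word c _ ha (fun x hx => List.mem_takeWhile_imp hx)] at hrec
            simp only [pvClassify, List.flatten_cons]
            have hha : pvHeadAlpha (c :: cs.takeWhile PySem.Chars.isalpha) = true := by
              simpa [pvHeadAlpha] using ha
            have hfp := pvNextParen_tokenize (cs.dropWhile PySem.Chars.isalpha)
            by_cases hcond : 2 ≤ (c :: cs.takeWhile PySem.Chars.isalpha).length ∧
                ¬ pvIdents.contains (c :: cs.takeWhile PySem.Chars.isalpha) = true
            · by_cases hfunc : (((cs.dropWhile PySem.Chars.isalpha).dropWhile
                  (fun x => x == ' ')).head? == some '(') = true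
              · rw [if_neg (fun hh => hh.2.2.1 hfunc)]
                rw [if_pos ⟨hha, hcond.1, hcond.2⟩]
                rw [if_neg (fun hh => hh.1 (hfp.trans hfunc))]
                rw [hrec]
              · by_cases hpdok : pvPrevDot prev = true
                · rw [if_neg (fun hh => hh.2.2.2 hpdok)]
                  rw [if_pos ⟨hha, hcond.1, hcond.2⟩]
                  rw [if_neg (fun hh => hh.2 hpdok)]
                  rw [hrec]
                · rw [if_pos ⟨hcond.1, hcond.2, hfunc, hpdok⟩]
                  rw [if_pos ⟨hha, hcond.1, hcond.2⟩]
                  rw [if_pos ⟨fun hh => hfunc (hfp.symm.trans hh), hpdok⟩]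
                  rw [hrec]
                  simp
            · rw [if_neg (fun hh => hcond ⟨hh.1, hh.2.1⟩)]
              rw [if_neg (fun hh => hcond ⟨hh.2.1, hh.2.2⟩)]
              rw [hrec]
          · rw [pvGoA_other c cs _ hq ha, pvTokenize_other c cs hq ha]
            have hrec := ih cs (by simp at hcs; omega) (some [c])
            rw [pvPrevDot_singleton] at hrec
            simp only [pvClassify, List.flatten_cons]
            rw [if_neg (fun hh => by simp [pvHeadAlpha, ha] at hh)]
            rw [hrec]
            simp

-- ===== VERDICT (by name: the statement is the Claim_ definition above) =====
theorem quote_multichar_identifiers_py_spec : Claim_equal_quote_multichar_identifiers_py := by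
  intro s _
  unfold Spec_quote_multichar_identifiers_py quote_multichar_identifiers_py quote_multichar_identifiers_py_alt
  rw [show (false : Bool) = pvPrevDot none from rfl,
    pvMain s.toList.length s.toList le_rfl none]
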